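-- pv_equiv track=rewrite | github.com/wblucca/proc-gen-workshop | ImageGeneration/markov_data.py | getRGBA
-- ===== SOURCE A (Python) =====
-- def getRGBA(color):
--     num_channels = len(color)
--     colorRGBA = []
--     for i in range(4):
--         if i < num_channels:
--             colorRGBA.append(color[i])
--         else:
--             colorRGBA.append(255)
--
--     # Convert to tuple
--     return tuple(colorRGBA)
-- ===== SOURCE B (Python) =====
-- def getRGBA(color):
--     # Structural recursion: consume one channel at a time with a countdown of
--     # remaining slots; once the input is exhausted, fill the rest with 255.
--     def go(xs, remaining):
--         if remaining == 0:
--             return ()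
--         if xs:
--             return (xs[0],) + go(xs[1:], remaining - 1)
--         return (255,) + go(xs, remaining - 1)
--     return go(tuple(color), 4)
-- ===== Notes on version B (the rewrite author's own statement) =====
-- stated objective: alternative
-- what changed: Replaces A's index-driven loop over range(4) (with an i < len(color) branch and list append) by a structural recursion that consumes the input list head-by-head with a countdown of remaining slots, emitting 255 once the list is exhausted; no indexing or length comparison per step.
import Mathlib
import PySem

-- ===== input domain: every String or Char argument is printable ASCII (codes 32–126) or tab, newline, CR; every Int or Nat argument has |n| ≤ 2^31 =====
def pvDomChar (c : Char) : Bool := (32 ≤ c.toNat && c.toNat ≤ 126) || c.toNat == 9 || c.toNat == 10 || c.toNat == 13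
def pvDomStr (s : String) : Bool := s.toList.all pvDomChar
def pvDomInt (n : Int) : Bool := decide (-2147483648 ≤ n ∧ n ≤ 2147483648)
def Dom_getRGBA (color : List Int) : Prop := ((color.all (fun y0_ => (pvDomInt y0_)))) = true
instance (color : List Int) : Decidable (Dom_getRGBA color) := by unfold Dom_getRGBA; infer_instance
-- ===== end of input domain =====

-- B replaces A's index-driven range(4) loop by a structural recursion on the list with a slot countdown; equal return value proved.

-- ===== PORT A =====
-- loop over range(4): append color[i] when i < len(color), else 255; in-range pyGet? with getD 0 (never hit)
def getRGBA (color : List Int) : List Int :=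
  (PySem.List.pyRange 0 4 1).foldl
    (fun colorRGBA i =>
      if i < (color.length : Int) then
        colorRGBA ++ [(PySem.List.pyGet? color i).getD 0]
      else
        colorRGBA ++ [255]) []

-- ===== PORT B =====
-- helper go(xs, remaining): recursion on the countdown, consuming the list head-by-head
def goRGBA : List Int → Nat → List Int
  | _, 0 => []
  | x :: xs, remaining + 1 => x :: goRGBA xs remaining
  | [], remaining + 1 => 255 :: goRGBA [] remaining

def getRGBA_alt (color : List Int) : List Int := goRGBA color 4

-- ===== PRECONDITION & SPEC =====
def Spec_getRGBA (color : List Int) (out : List Int) : Prop := out = getRGBA_alt color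
instance (color : List Int) (out : List Int) : Decidable (Spec_getRGBA color out) := by unfold Spec_getRGBA; infer_instance

-- ===== CLAIM =====
def Claim_equal_getRGBA : Prop := ∀ (color : List Int), Dom_getRGBA color → Spec_getRGBA color (getRGBA color)

-- ===== LEMMAS AND PROOFS =====

-- ===== VERDICT =====
theorem getRGBA_spec : Claim_equal_getRGBA := by
  intro color _
  unfold Spec_getRGBA getRGBA getRGBA_alt
  match color with
  | [] => decide
  | [a] =>
    simp [PySem.List.pyRange, PySem.List.pyGet?, PySem.List.pyIdx?, List.range_succ, goRGBA]
  | [a, b] =>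
    simp [PySem.List.pyRange, PySem.List.pyGet?, PySem.List.pyIdx?, List.range_succ, goRGBA]
  | [a, b, c] =>
    simp [PySem.List.pyRange, PySem.List.pyGet?, PySem.List.pyIdx?, List.range_succ, goRGBA]
  | a :: b :: c :: d :: rest =>
    simp [PySem.List.pyRange, PySem.List.pyGet?, PySem.List.pyIdx?, List.range_succ, goRGBA]
    have h0 : (0:Int) ≤ (rest.length : Int) := Int.natCast_nonneg _
    split_ifs <;> simp_all <;> omega
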